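-- pv_equiv track=rewrite | github.com/wpx112/Love_recycling | tools/ID_Units_PC&IPAD.py | generate_id_groups
-- ===== SOURCE A (Python) =====
-- def generate_id_groups(data_ids, dd):
--     id_groups = []
--
--     for i in range(len(data_ids)):
--
--         if i == 0:
--             n = 1
--             lst = [data_ids[i]]
--             while n < len(data_ids):
--                 if n != len(data_ids) - 1:
--                     if data_ids[n][0] == '%s' % dd:
--                         lst.append([data_ids[n][1]])
--                     else:
--                         lst.append([data_ids[n][0]])
--                 else:
--                     break
--                 n += 1
--
--             id_groups.append(lst)
--
--         elif i < len(data_ids) - 1: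
--             n = 1
--             m = 1
--             lst = []
--
--             if data_ids[i][0] == '%s' % dd:
--                 lst += [data_ids[i][0:]]
--             else:
--                 lst += [data_ids[i][1:]]
--
--             while n - 1 < i:
--                 if data_ids[n - 1][0] == '%s' % dd:
--                     lst.insert(n - 1, [data_ids[n - 1][1]])
--                 else:
--                     lst.insert(n - 1, [data_ids[n - 1][0]])
--                 n += 1
--
--             while m + i < len(data_ids):
--                 if m + i != len(data_ids) - 1:
--                     lst.append([data_ids[m + i][0]])
--                 else:
--                     break
--                 m += 1
--
--             id_groups.append(lst)
--
--         elif i == len(data_ids) - 1: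
--             n = 1
--             lst = [data_ids[i]]
--
--             while n - 1 < i:
--                 if data_ids[n - 1][0] == '%s' % dd:
--                     lst.insert(n - 1, [data_ids[n - 1][1]])
--                 else:
--                     lst.insert(n - 1, [data_ids[n - 1][0]])
--                 n += 1
--
--             id_groups.append(lst)
--
--     return id_groups
-- ===== SOURCE B (Python) =====
-- def generate_id_groups(data_ids, dd):
--     # Precompute transform tables once over data_ids[:-1], then assemble each
--     # group by slicing, instead of per-group insert/append loops.
--     n = len(data_ids)
--     front = data_ids[:-1]
--     T = [[r[1]] if r[0] == dd else [r[0]] for r in front]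
--     F = [[r[0]] for r in front]
--     groups = []
--     for i in range(n):
--         if i == 0:
--             groups.append([data_ids[0]] + T[1:])
--         elif i < n - 1:
--             r = data_ids[i]
--             self_i = r[0:] if r[0] == dd else r[1:]
--             groups.append(T[:i] + [self_i] + F[i + 1:])
--         else:
--             groups.append(T[:i] + [data_ids[i]])
--     return groups
-- ===== Notes on version B (the rewrite author's own statement) =====
-- stated objective: faster
-- what changed: B precomputes the marker-transform tables T/F once over data_ids[:-1] and assembles each group by list slicing, replacing A's per-group insert-prepend and append while-loops (constant-factor: C-level slices and no repeated per-element transform/insert).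
import Mathlib
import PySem

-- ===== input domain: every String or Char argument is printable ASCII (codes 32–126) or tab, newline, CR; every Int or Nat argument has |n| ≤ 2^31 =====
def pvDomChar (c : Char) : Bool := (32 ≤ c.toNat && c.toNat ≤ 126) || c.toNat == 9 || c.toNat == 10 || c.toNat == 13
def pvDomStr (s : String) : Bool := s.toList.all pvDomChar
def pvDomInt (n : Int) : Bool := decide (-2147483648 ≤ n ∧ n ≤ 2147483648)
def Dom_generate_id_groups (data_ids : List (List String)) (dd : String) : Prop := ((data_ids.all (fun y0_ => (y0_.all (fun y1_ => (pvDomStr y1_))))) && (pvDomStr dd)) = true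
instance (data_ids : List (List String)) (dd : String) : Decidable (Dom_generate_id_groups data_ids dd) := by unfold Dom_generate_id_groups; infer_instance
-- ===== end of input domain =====

-- B precomputes the marker-transform tables once over data_ids[:-1] and assembles
-- each group by slicing, replacing A's per-group insert/prepend and append loops
-- (objective: alternative decomposition, same asymptotic cost).

-- ===== PORT A =====
-- transform of row j used by A's three loops: [row[1]] if row[0]==dd else [row[0]]
def pvAT (data : List (List String)) (dd : String) (j : Nat) : List String :=
  let r := data.getD j []
  if r.headD "" = dd then [(r.drop 1).headD ""] else [r.headD ""]

-- A, branch i==0: while n < len: if n != len-1 then append transform else break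
def pvALoop0 (data : List (List String)) (dd : String) (n : Nat)
    (lst : List (List String)) : List (List String) :=
  if n < data.length then
    if n ≠ data.length - 1 then
      pvALoop0 data dd (n + 1) (lst ++ [pvAT data dd n])
    else lst
  else lst
termination_by data.length - n

-- A's insert loop: while n-1 < i: lst.insert(n-1, transform(n-1))
def pvALoopIns (data : List (List String)) (dd : String) (i n : Nat)
    (lst : List (List String)) : List (List String) :=
  if n - 1 < i then
    pvALoopIns data dd i (n + 1) (lst.insertIdx (n - 1) (pvAT data dd (n - 1)))
  else lst
termination_by i + 1 - n

-- A's append loop (middle branch): while m+i < len: if m+i != len-1 append [row[0]] else break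
def pvALoopApp (data : List (List String)) (dd : String) (i m : Nat)
    (lst : List (List String)) : List (List String) :=
  if m + i < data.length then
    if m + i ≠ data.length - 1 then
      pvALoopApp data dd i (m + 1) (lst ++ [[(data.getD (m + i) []).headD ""]])
    else lst
  else lst
termination_by data.length - (m + i)

def pvAGroup (data : List (List String)) (dd : String) (i : Nat) : List (List String) :=
  if i = 0 then
    pvALoop0 data dd 1 [data.getD 0 []]
  else if i < data.length - 1 then
    let r := data.getD i []
    let lst : List (List String) := if r.headD "" = dd then [r] else [r.drop 1]
    pvALoopApp data dd i 1 (pvALoopIns data dd i 1 lst)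
  else
    pvALoopIns data dd i 1 [data.getD i []]

def generate_id_groups (data_ids : List (List String)) (dd : String) : List (List (List String)) :=
  (List.range data_ids.length).map (pvAGroup data_ids dd)

-- ===== PORT B =====
def pvBT (dd : String) (r : List String) : List String :=
  if r.headD "" = dd then [(r.drop 1).headD ""] else [r.headD ""]

def pvBF (r : List String) : List String := [r.headD ""]

def generate_id_groups_alt (data_ids : List (List String)) (dd : String) : List (List (List String)) :=
  let n := data_ids.length
  let front := data_ids.take (n - 1)
  let T := front.map (pvBT dd)
  let F := front.map pvBF
  (List.range n).map (fun i =>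
    if i = 0 then
      data_ids.getD 0 [] :: T.drop 1
    else if i < n - 1 then
      let r := data_ids.getD i []
      let self_i := if r.headD "" = dd then r else r.drop 1
      T.take i ++ self_i :: F.drop (i + 1)
    else
      T.take i ++ [data_ids.getD i []])

-- ===== PRECONDITION & SPEC =====
-- Pre_: exactly the inputs where Python A returns: every row except the last is
-- nonempty, and such a row whose head equals dd has a second element (else A
-- raises IndexError on row[0]/row[1]).
def Pre_generate_id_groups (data_ids : List (List String)) (dd : String) : Prop :=
  ∀ r ∈ data_ids.dropLast, r ≠ [] ∧ (r.headD "" = dd → 2 ≤ r.length)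
instance (data_ids : List (List String)) (dd : String) : Decidable (Pre_generate_id_groups data_ids dd) := by unfold Pre_generate_id_groups; infer_instance

def pvWitness_generate_id_groups : List (List String) × String :=
  ([["%", "a"], ["b"], ["c", "d"], ["%"]], "%")

def Spec_generate_id_groups (data_ids : List (List String)) (dd : String) (out : List (List (List String))) : Prop := out = generate_id_groups_alt data_ids dd
instance (data_ids : List (List String)) (dd : String) (out : List (List (List String))) : Decidable (Spec_generate_id_groups data_ids dd out) := by unfold Spec_generate_id_groups; infer_instance

-- ===== CLAIM (what is proved, stated in full; the proofs are below) =====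
def Claim_equal_generate_id_groups : Prop := ∀ (data_ids : List (List String)) (dd : String), Dom_generate_id_groups data_ids dd → Pre_generate_id_groups data_ids dd → Spec_generate_id_groups data_ids dd (generate_id_groups data_ids dd)

-- ===== LEMMAS AND PROOFS =====

theorem pvT_take_getElem (data : List (List String)) (dd : String) (j : Nat)
    (h : j < ((data.take (data.length - 1)).map (pvBT dd)).length) :
    ((data.take (data.length - 1)).map (pvBT dd))[j] = pvAT data dd j := by
  simp only [List.length_map, List.length_take] at h
  have hj : j < data.length := lt_of_lt_of_le (lt_min_iff.mp h).2 (le_refl _) |>.trans_le (le_refl _)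
  simp [pvAT, pvBT, List.getElem_map, List.getElem_take,
    List.getD_eq_getElem?_getD, List.getElem?_eq_getElem hj]

theorem insertIdx_at_length {α : Type} (acc rest : List α) (x : α) :
    (acc ++ rest).insertIdx acc.length x = acc ++ x :: rest := by
  induction acc with
  | nil => rfl
  | cons a as ih => simpa [List.insertIdx_succ_cons] using ih

theorem pvT_length (data : List (List String)) (dd : String) :
    ((data.take (data.length - 1)).map (pvBT dd)).length = data.length - 1 := by
  simp

theorem pvALoop0_eq (data : List (List String)) (dd : String) :
    ∀ (k : Nat) (lst : List (List String)),
      pvALoop0 data dd k lst = lst ++ ((data.take (data.length - 1)).map (pvBT dd)).drop k := by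
  have H : ∀ (d k : Nat) (lst : List (List String)), data.length - k ≤ d →
      pvALoop0 data dd k lst = lst ++ ((data.take (data.length - 1)).map (pvBT dd)).drop k := by
    intro d
    induction d with
    | zero =>
      intro k lst hk
      rw [pvALoop0]
      have hkl : ¬ k < data.length := by omega
      rw [if_neg hkl, List.drop_eq_nil_of_le (by rw [pvT_length]; omega), List.append_nil]
    | succ d ih =>
      intro k lst hk
      rw [pvALoop0]
      by_cases h1 : k < data.length
      · rw [if_pos h1]
        by_cases h2 : k ≠ data.length - 1
        · rw [if_pos h2]
          have hkT : k < ((data.take (data.length - 1)).map (pvBT dd)).length := by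
            rw [pvT_length]; omega
          rw [ih (k + 1) _ (by omega), List.drop_eq_getElem_cons hkT,
            pvT_take_getElem data dd k hkT]
          simp
        · rw [if_neg h2]
          rw [List.drop_eq_nil_of_le (by rw [pvT_length]; omega), List.append_nil]
      · rw [if_neg h1]
        rw [List.drop_eq_nil_of_le (by rw [pvT_length]; omega), List.append_nil]
  intro k lst
  exact H (data.length - k) k lst (le_refl _)

theorem pvF_take_getElem (data : List (List String)) (j : Nat)
    (h : j < ((data.take (data.length - 1)).map pvBF).length) :
    ((data.take (data.length - 1)).map pvBF)[j] = [(data.getD j []).headD ""] := by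
  simp only [List.length_map, List.length_take] at h
  have hj : j < data.length := by omega
  simp [pvBF, List.getElem_map, List.getElem_take,
    List.getD_eq_getElem?_getD, List.getElem?_eq_getElem hj]

theorem pvF_length (data : List (List String)) :
    ((data.take (data.length - 1)).map pvBF).length = data.length - 1 := by
  simp

theorem pvALoopApp_eq (data : List (List String)) (dd : String) (i : Nat) :
    ∀ (m : Nat) (lst : List (List String)),
      pvALoopApp data dd i m lst = lst ++ ((data.take (data.length - 1)).map pvBF).drop (m + i) := by
  have H : ∀ (d m : Nat) (lst : List (List String)), data.length - (m + i) ≤ d →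
      pvALoopApp data dd i m lst = lst ++ ((data.take (data.length - 1)).map pvBF).drop (m + i) := by
    intro d
    induction d with
    | zero =>
      intro m lst hk
      rw [pvALoopApp]
      rw [if_neg (by omega), List.drop_eq_nil_of_le (by rw [pvF_length]; omega), List.append_nil]
    | succ d ih =>
      intro m lst hk
      rw [pvALoopApp]
      by_cases h1 : m + i < data.length
      · rw [if_pos h1]
        by_cases h2 : m + i ≠ data.length - 1
        · rw [if_pos h2]
          have hkF : m + i < ((data.take (data.length - 1)).map pvBF).length := by
            rw [pvF_length]; omega
          rw [ih (m + 1) _ (by omega), List.drop_eq_getElem_cons hkF,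
            pvF_take_getElem data (m + i) hkF]
          have : m + 1 + i = m + i + 1 := by omega
          rw [this]
          simp
        · rw [if_neg h2]
          rw [List.drop_eq_nil_of_le (by rw [pvF_length]; omega), List.append_nil]
      · rw [if_neg h1]
        rw [List.drop_eq_nil_of_le (by rw [pvF_length]; omega), List.append_nil]
  intro m lst
  exact H (data.length - (m + i)) m lst (le_refl _)

theorem pvALoopIns_eq (data : List (List String)) (dd : String) (i : Nat)
    (hi : i ≤ data.length - 1) :
    ∀ (j : Nat) (acc rest : List (List String)), acc.length = j →
      pvALoopIns data dd i (j + 1) (acc ++ rest)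
        = acc ++ (((data.take (data.length - 1)).map (pvBT dd)).drop j).take (i - j) ++ rest := by
  have H : ∀ (d j : Nat) (acc rest : List (List String)), i - j ≤ d → acc.length = j →
      pvALoopIns data dd i (j + 1) (acc ++ rest)
        = acc ++ (((data.take (data.length - 1)).map (pvBT dd)).drop j).take (i - j) ++ rest := by
    intro d
    induction d with
    | zero =>
      intro j acc rest hd hlen
      rw [pvALoopIns]
      have : ¬ (j + 1 - 1 < i) := by omega
      rw [if_neg this]
      have : i - j = 0 := by omega
      rw [this, List.take_zero, List.append_nil]
    | succ d ih =>
      intro j acc rest hd hlen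
      rw [pvALoopIns]
      by_cases h1 : j + 1 - 1 < i
      · rw [if_pos h1]
        have hj : j < i := by omega
        have hjT : j < ((data.take (data.length - 1)).map (pvBT dd)).length := by
          rw [pvT_length]; omega
        have hins : (acc ++ rest).insertIdx (j + 1 - 1) (pvAT data dd (j + 1 - 1))
            = (acc ++ [pvAT data dd j]) ++ rest := by
          have hz : j + 1 - 1 = j := by omega
          rw [hz, ← hlen, insertIdx_at_length]
          simp
        rw [hins]
        have := ih (j + 1) (acc ++ [pvAT data dd j]) rest (by omega) (by simp [hlen])
        rw [this, List.drop_eq_getElem_cons hjT, pvT_take_getElem data dd j hjT]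
        have hij : i - j = (i - (j + 1)) + 1 := by omega
        rw [hij, List.take_succ_cons]
        simp
      · rw [if_neg h1]
        have : i - j = 0 := by omega
        rw [this, List.take_zero, List.append_nil]
  intro j acc rest hlen
  exact H (i - j) j acc rest (le_refl _) hlen

-- ===== VERDICT (by name: the statement is the Claim_ definition above) =====
theorem generate_id_groups_spec : Claim_equal_generate_id_groups := by
  intro data dd _ _
  unfold Spec_generate_id_groups generate_id_groups generate_id_groups_alt
  apply List.map_congr_left
  intro i hi
  rw [List.mem_range] at hi
  by_cases h0 : i = 0
  · subst h0
    simp only [pvAGroup]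
    rw [pvALoop0_eq]
    simp
  · rw [if_neg h0]
    unfold pvAGroup
    rw [if_neg h0]
    by_cases hm : i < data.length - 1
    · rw [if_pos hm, if_pos hm]
      have hIns := pvALoopIns_eq data dd i (by omega) 0
        [] [if (data.getD i []).headD "" = dd then data.getD i [] else (data.getD i []).drop 1]
        rfl
      have hself : (if (data.getD i []).headD "" = dd then [data.getD i []]
          else [(data.getD i []).drop 1])
          = [if (data.getD i []).headD "" = dd then data.getD i [] else (data.getD i []).drop 1] := by
        split <;> rfl
      simp only [List.nil_append, Nat.zero_add] at hIns
      simp only [hself]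
      rw [hIns, pvALoopApp_eq]
      simp only [List.drop_zero, Nat.sub_zero]
      have : 1 + i = i + 1 := by omega
      rw [this, List.append_assoc]
      rfl
    · rw [if_neg hm, if_neg hm]
      have hIns := pvALoopIns_eq data dd i (by omega) 0 [] [data.getD i []] rfl
      simp only [List.nil_append, Nat.zero_add] at hIns
      simpa using hIns
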